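-- pv_equiv track=rewrite | github.com/SeungHyunH/programmersAlgorithm | programmers/Level2/더맵게/solution.py | solution
-- ===== SOURCE A (Python) =====
-- import heapq
--
-- def solution(scoville, K):
--   answer = 0
--   heapq.heapify(scoville)
--   while scoville[0]<K:
--     heapq.heappush(scoville,(heapq.heappop(scoville)+heapq.heappop(scoville)*2))
--     answer+=1
--     if len(scoville)==1:
--       break
--   if scoville[0]<K:
--     answer = -1
--   return answer
-- ===== SOURCE B (Python) =====
-- def solution(scoville, K):
--     scoville.sort()
--     answer = 0
--     while scoville[0] < K:
--         a = scoville.pop(0)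
--         b = scoville.pop(0)
--         c = a + b * 2
--         i = 0
--         while i < len(scoville) and scoville[i] < c:
--             i += 1
--         scoville.insert(i, c)
--         answer += 1
--         if len(scoville) == 1:
--             break
--     if scoville[0] < K:
--         answer = -1
--     return answer
-- ===== Notes on version B (the rewrite author's own statement) =====
-- stated objective: alternative
-- what changed: Replaces the binary heap with a list sorted once up front and kept in ascending order: the two smallest elements are popped from the front and the combination is re-inserted at its sorted position by a linear scan.
import Mathlib
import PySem

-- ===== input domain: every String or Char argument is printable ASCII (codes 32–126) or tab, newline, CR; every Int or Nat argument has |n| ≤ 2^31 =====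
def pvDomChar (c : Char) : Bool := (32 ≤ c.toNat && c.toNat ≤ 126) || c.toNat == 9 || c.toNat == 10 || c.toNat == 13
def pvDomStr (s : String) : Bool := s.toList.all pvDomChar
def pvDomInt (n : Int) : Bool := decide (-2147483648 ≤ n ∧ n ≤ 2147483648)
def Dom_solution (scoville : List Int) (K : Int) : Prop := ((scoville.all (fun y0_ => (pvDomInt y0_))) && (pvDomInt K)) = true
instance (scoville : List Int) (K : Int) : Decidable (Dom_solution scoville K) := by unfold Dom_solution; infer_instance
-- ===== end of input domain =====

-- B replaces A's binary heap with a sorted list kept in order by ordered insertion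
-- (objective: alternative decomposition, same combine-two-smallest behaviour).
-- Both A and B mutate the argument list in place (heapify/pops vs sort/pops); the
-- equivalence proved here is about the RETURN value only.

-- ===== PORT A =====
-- heapq is modeled by its documented effect on the heap's contents: scoville[0]
-- (the root) is the minimum, heappop removes one occurrence of the minimum,
-- heappush adds the element.  This is exact for the return value, which depends
-- only on the multiset of heap contents at each step.
def pvHeapMin (xs : List Int) : Int :=
  match xs with
  | [] => 0
  | x :: t => t.foldl min x

def pvHeapPop (xs : List Int) : List Int := xs.erase (pvHeapMin xs)

-- needed by pvLoopA's decreasing_by (cited by name there)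
theorem pvFoldlMin_mem : ∀ (t : List Int) (a : Int), t.foldl min a ∈ a :: t := by
  intro t
  induction t with
  | nil => intro a; simp [List.foldl]
  | cons y t ih =>
    intro a
    have h := ih (min a y)
    simp only [List.foldl]
    rcases List.mem_cons.mp h with h' | h'
    · rw [h']
      rcases min_choice a y with hm | hm <;> rw [hm] <;> simp
    · exact List.mem_cons_of_mem _ (List.mem_cons_of_mem _ h')

theorem pvHeapMin_mem (xs : List Int) (h : xs ≠ []) : pvHeapMin xs ∈ xs := by
  match xs with
  | [] => exact absurd rfl h
  | x :: t => exact pvFoldlMin_mem t x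

theorem pvHeapPop_length (xs : List Int) (h : xs ≠ []) :
    (pvHeapPop xs).length + 1 = xs.length := by
  unfold pvHeapPop
  rw [List.length_erase_of_mem (pvHeapMin_mem xs h)]
  have : xs.length ≠ 0 := by simpa using List.length_pos_of_ne_nil h |>.ne'
  omega

-- the heappush(heappop(...) + heappop(...)*2) line: the heap after one combine
def pvStep (xs : List Int) : List Int :=
  (pvHeapMin xs + pvHeapMin (pvHeapPop xs) * 2) :: pvHeapPop (pvHeapPop xs)

def pvLoopA (K : Int) (xs : List Int) (answer : Int) : List Int × Int :=
  if pvHeapMin xs < K then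
    if (pvStep xs).length = 1 then (pvStep xs, answer + 1)
    else pvLoopA K (pvStep xs) (answer + 1)
  else (xs, answer)
termination_by xs.length
decreasing_by
  rename_i _ h2
  simp only [pvStep, List.length_cons] at h2 ⊢
  have hxs2 : pvHeapPop (pvHeapPop xs) ≠ [] := by
    intro he; rw [he] at h2; simp at h2
  have hxs1 : pvHeapPop xs ≠ [] := by
    intro he; apply hxs2; rw [he]; rfl
  have hxs : xs ≠ [] := by
    intro he; apply hxs1; rw [he]; rfl
  have l1 := pvHeapPop_length xs hxs
  have l2 := pvHeapPop_length (pvHeapPop xs) hxs1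
  omega

def solution (scoville : List Int) (K : Int) : Int :=
  let r := pvLoopA K scoville 0
  if pvHeapMin r.1 < K then -1 else r.2

-- ===== PORT B =====
-- Source B: sort in place, pop the two smallest from the front, re-insert the
-- combination at its sorted position (the hand-written index scan `while
-- i < len and scoville[i] < c` becomes the structural recursion pvInsort).
def pvInsort (c : Int) : List Int → List Int
  | [] => [c]
  | x :: t => if x < c then x :: pvInsort c t else c :: x :: t

-- needed by pvLoopB's decreasing_by (cited by name there)
theorem pvInsort_length (c : Int) : ∀ t : List Int, (pvInsort c t).length = t.length + 1 := by
  intro t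
  induction t with
  | nil => rfl
  | cons x t ih => by_cases h : x < c <;> simp [pvInsort, h, ih]

def pvLoopB (K : Int) (ys : List Int) (answer : Int) : List Int × Int :=
  match ys with
  | [] => ([], answer)
  | [a] => ([a], answer)
  | a :: b :: rest =>
    if a < K then
      if (pvInsort (a + b * 2) rest).length = 1 then (pvInsort (a + b * 2) rest, answer + 1)
      else pvLoopB K (pvInsort (a + b * 2) rest) (answer + 1)
    else (a :: b :: rest, answer)
termination_by ys.length
decreasing_by
  simp [pvInsort_length]

def solution_alt (scoville : List Int) (K : Int) : Int :=
  let r := pvLoopB K (PySem.List.sorted scoville (fun x => x) false) 0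
  if r.1.headD 0 < K then -1 else r.2

-- ===== PRECONDITION & SPEC =====
-- Pre_ excludes exactly the inputs on which A raises IndexError: the empty list
-- (scoville[0] fails) and a single-element list below K (the second heappop
-- pops from an empty heap).  B raises there too.
def Pre_solution (scoville : List Int) (K : Int) : Prop :=
  scoville ≠ [] ∧ (scoville.length = 1 → ¬ scoville.headD 0 < K)
instance (scoville : List Int) (K : Int) : Decidable (Pre_solution scoville K) := by
  unfold Pre_solution; infer_instance

def pvWitness_solution : List Int × Int := ([1, 2, 3, 9, 10, 12], 7)

def Spec_solution (scoville : List Int) (K : Int) (out : Int) : Prop := out = solution_alt scoville K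
instance (scoville : List Int) (K : Int) (out : Int) : Decidable (Spec_solution scoville K out) := by
  unfold Spec_solution; infer_instance

-- ===== CLAIM (what is proved, stated in full; the proofs are below) =====
def Claim_equal_solution : Prop := ∀ (scoville : List Int) (K : Int), Dom_solution scoville K → Pre_solution scoville K → Spec_solution scoville K (solution scoville K)

-- ===== LEMMAS AND PROOFS =====

theorem pvFoldlMin_le (t : List Int) (a : Int) :
    t.foldl min a ≤ a ∧ ∀ y ∈ t, t.foldl min a ≤ y := by
  induction t generalizing a with
  | nil => simp
  | cons y t ih =>
    have h := ih (min a y)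
    constructor
    · exact le_trans h.1 (min_le_left a y)
    · intro z hz
      rcases List.mem_cons.mp hz with h' | h'
      · subst h'; exact le_trans h.1 (min_le_right a z)
      · exact h.2 z h'

theorem pvHeapMin_isMin (xs : List Int) : ∀ y ∈ xs, pvHeapMin xs ≤ y := by
  match xs with
  | [] => simp
  | x :: t =>
    intro y hy
    rcases List.mem_cons.mp hy with h' | h'
    · subst h'; exact (pvFoldlMin_le t y).1
    · exact (pvFoldlMin_le t x).2 y h'

theorem pvHeapMin_perm {xs ys : List Int} (h : xs.Perm ys) : pvHeapMin xs = pvHeapMin ys := by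
  rcases eq_or_ne xs [] with he | he
  · subst he; rw [List.perm_nil.mp h.symm]
  · have hys : ys ≠ [] := fun hy => he (List.perm_nil.mp (hy ▸ h))
    exact le_antisymm
      (pvHeapMin_isMin xs _ (h.mem_iff.mpr (pvHeapMin_mem ys hys)))
      (pvHeapMin_isMin ys _ (h.mem_iff.mp (pvHeapMin_mem xs he)))

theorem pvHeapMin_sorted_head (a : Int) (t : List Int)
    (hs : (a :: t).Pairwise (· ≤ ·)) : pvHeapMin (a :: t) = a := by
  apply le_antisymm (pvHeapMin_isMin _ a (by simp))
  have hmem := pvHeapMin_mem (a :: t) (by simp)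
  rcases List.mem_cons.mp hmem with h' | h'
  · exact le_of_eq h'.symm
  · exact (List.pairwise_cons.mp hs).1 _ h'

theorem pvInsort_perm (c : Int) : ∀ t : List Int, (pvInsort c t).Perm (c :: t) := by
  intro t
  induction t with
  | nil => simp [pvInsort]
  | cons x t ih =>
    by_cases h : x < c
    · simp only [pvInsort, if_pos h]
      exact (ih.cons x).trans (List.Perm.swap c x t)
    · simp [pvInsort, if_neg h]

theorem pvInsort_sorted (c : Int) : ∀ t : List Int,
    t.Pairwise (· ≤ ·) → (pvInsort c t).Pairwise (· ≤ ·) := by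
  intro t
  induction t with
  | nil => simp [pvInsort]
  | cons x t ih =>
    intro hs
    rcases List.pairwise_cons.mp hs with ⟨hx, ht⟩
    by_cases h : x < c
    · simp only [pvInsort, if_pos h]
      refine List.pairwise_cons.mpr ⟨?_, ih ht⟩
      intro y hy
      rcases List.mem_cons.mp ((pvInsort_perm c t).mem_iff.mp hy) with h' | h'
      · exact h' ▸ le_of_lt h
      · exact hx y h'
    · simp only [pvInsort, if_neg h]
      refine List.pairwise_cons.mpr ⟨?_, hs⟩
      intro y hy
      rcases List.mem_cons.mp hy with h' | h'
      · exact h' ▸ le_of_not_gt h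
      · exact le_trans (le_of_not_gt h) (hx y h')

theorem pvLoop_agree (K : Int) : ∀ (n : Nat) (xs ys : List Int) (ans : Int),
    ys.length ≤ n → xs.Perm ys → ys.Pairwise (· ≤ ·) → ys ≠ [] →
    (ys.length = 1 → ¬ ys.headD 0 < K) →
    (pvLoopA K xs ans).2 = (pvLoopB K ys ans).2 ∧
    (pvLoopA K xs ans).1.Perm (pvLoopB K ys ans).1 ∧
    (pvLoopB K ys ans).1.Pairwise (· ≤ ·) ∧ (pvLoopB K ys ans).1 ≠ [] := by
  intro n
  induction n with
  | zero =>
    intro xs ys ans hn _ _ hne _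
    exact absurd (List.length_eq_zero_iff.mp (Nat.le_zero.mp hn)) hne
  | succ n ih =>
    intro xs ys ans hn hperm hsort hne h1
    match ys, hne with
    | [a], _ =>
      have hxs : xs = [a] := List.perm_singleton.mp hperm
      have hK : ¬ a < K := by simpa using h1 (by simp)
      subst hxs
      rw [pvLoopA, pvLoopB]
      have hm : pvHeapMin [a] = a := by simp [pvHeapMin]
      rw [hm, if_neg hK]
      exact ⟨rfl, List.Perm.refl _, hsort, by simp⟩
    | a :: b :: rest, _ =>
      have hmin : pvHeapMin xs = a := by
        rw [pvHeapMin_perm hperm, pvHeapMin_sorted_head a _ hsort]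
      rw [pvLoopA, pvLoopB, hmin]
      by_cases hK : a < K
      · rw [if_pos hK, if_pos hK]
        have hamem : a ∈ xs := hperm.mem_iff.mpr (by simp)
        have hp1 : (pvHeapPop xs).Perm (b :: rest) := by
          have h2 := hperm.erase a
          rw [List.erase_cons_head] at h2
          rw [pvHeapPop, hmin]
          exact h2
        have hsort' : (b :: rest).Pairwise (· ≤ ·) := (List.pairwise_cons.mp hsort).2
        have hb : pvHeapMin (pvHeapPop xs) = b := by
          rw [pvHeapMin_perm hp1, pvHeapMin_sorted_head b _ hsort']
        have hp2 : (pvHeapPop (pvHeapPop xs)).Perm rest := by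
          have h2 := hp1.erase b
          rw [List.erase_cons_head] at h2
          have he : pvHeapPop (pvHeapPop xs) = (pvHeapPop xs).erase b := by
            rw [pvHeapPop, hb]
          rw [he]
          exact h2
        have hstep : pvStep xs = (a + b * 2) :: pvHeapPop (pvHeapPop xs) := by
          rw [pvStep, hmin, hb]
        have hp3 : (pvStep xs).Perm (pvInsort (a + b * 2) rest) := by
          rw [hstep]
          exact (hp2.cons (a + b * 2)).trans (pvInsort_perm (a + b * 2) rest).symm
        have hlen : (pvStep xs).length = (pvInsort (a + b * 2) rest).length :=
          hp3.length_eq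
        have hsort2 : (pvInsort (a + b * 2) rest).Pairwise (· ≤ ·) :=
          pvInsort_sorted (a + b * 2) rest ((List.pairwise_cons.mp hsort').2)
        have hne2 : pvInsort (a + b * 2) rest ≠ [] := by
          intro he; rw [he, hstep] at hlen; simp at hlen
        by_cases hl : (pvInsort (a + b * 2) rest).length = 1
        · rw [if_pos (by rw [hlen]; exact hl), if_pos hl]
          exact ⟨rfl, hp3, hsort2, hne2⟩
        · rw [if_neg (by rw [hlen]; exact hl), if_neg hl]
          apply ih _ _ (ans + 1) _ hp3 hsort2 hne2 (fun h => absurd h hl)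
          have hl2 := (pvInsort_perm (a + b * 2) rest).length_eq
          simp only [List.length_cons] at hl2 hn ⊢
          omega
      · rw [if_neg hK, if_neg hK]
        exact ⟨rfl, hperm, hsort, by simp⟩

-- ===== VERDICT (by name: the statement is the Claim_ definition above) =====
theorem solution_spec : Claim_equal_solution := by
  intro scoville K _ hpre
  rcases hpre with ⟨hne, h1⟩
  unfold Spec_solution solution solution_alt
  set ys := PySem.List.sorted scoville (fun x => x) false with hys
  have hperm : scoville.Perm ys := (PySem.List.sorted_perm scoville (fun x => x) false).symm
  have hsort : ys.Pairwise (· ≤ ·) := by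
    simpa using PySem.List.sorted_pairwise scoville (fun x => x)
  have hyne : ys ≠ [] := by
    intro he
    exact hne (List.perm_nil.mp (he ▸ hperm))
  have hy1 : ys.length = 1 → ¬ ys.headD 0 < K := by
    intro hl
    rcases List.length_eq_one_iff.mp hl with ⟨y, hy⟩
    have hsl : scoville.length = 1 := by rw [hperm.length_eq, hl]
    rcases List.length_eq_one_iff.mp hsl with ⟨x, hx⟩
    have : x = y := by
      have h2 := hperm
      rw [hx, hy] at h2
      simpa using List.perm_singleton.mp h2
    rw [hy]
    subst this
    have := h1 hsl
    rwa [hx] at this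
  obtain ⟨hans, hp, hs, hn⟩ :=
    pvLoop_agree K ys.length scoville ys 0 le_rfl hperm hsort hyne hy1
  have hhead : pvHeapMin (pvLoopA K scoville 0).1 = (pvLoopB K ys 0).1.headD 0 := by
    rw [pvHeapMin_perm hp]
    match h : (pvLoopB K ys 0).1, hn with
    | z :: t, _ =>
      rw [pvHeapMin_sorted_head z t (h ▸ hs)]
      rfl
  simp only [hhead, hans]
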